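-- pv_equiv track=rewrite | github.com/manwar/perlweeklychallenge-club | challenge-185/roger-bell-west/python/ch-2.py | recomposemaskcode
-- ===== SOURCE A (Python) =====
-- def recomposemaskcode(lst):
--   out = []
--   for ins in lst:
--     count = 0
--     os = ""
--     for c in ins:
--       if (c >= "0" and c <= "9") or (c >= "a" and c <= "z"):
--         if count < 4:
--           count += 1
--           os += "x"
--         else:
--           os += c
--       else:
--         os += c
--     out.append(os)
--   return out
-- ===== SOURCE B (Python) =====
-- import re
--
-- def recomposemaskcode(lst):
--     return [re.sub(r'[0-9a-z]', 'x', s, count=4) for s in lst]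
-- ===== Notes on version B (the rewrite author's own statement) =====
-- stated objective: idiomatic
-- what changed: Replaces the explicit counter-driven character scan and manual string accumulation with a single regex substitution re.sub(r'[0-9a-z]','x',s,count=4) inside a list comprehension.
import Mathlib
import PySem

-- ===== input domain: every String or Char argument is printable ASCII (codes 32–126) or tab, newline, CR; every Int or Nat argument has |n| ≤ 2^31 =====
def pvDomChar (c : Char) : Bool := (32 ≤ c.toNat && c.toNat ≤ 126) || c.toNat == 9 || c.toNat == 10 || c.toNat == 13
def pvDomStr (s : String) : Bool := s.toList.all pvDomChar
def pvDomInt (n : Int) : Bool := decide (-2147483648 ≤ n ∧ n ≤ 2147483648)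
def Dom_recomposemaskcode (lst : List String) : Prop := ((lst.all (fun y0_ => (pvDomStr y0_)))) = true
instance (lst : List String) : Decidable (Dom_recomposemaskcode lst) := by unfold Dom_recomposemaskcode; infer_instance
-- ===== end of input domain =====

-- B masks the first 4 digit/lowercase chars via a regex-style budgeted substitution instead of A's counter-driven scan with string accumulation (idiomatic).


-- ===== PORT A =====
-- the inner per-character step of A's scan: state is (count, os)
def pvStepA (st : Int × List Char) (c : Char) : Int × List Char :=
  if ('0' ≤ c ∧ c ≤ '9') ∨ ('a' ≤ c ∧ c ≤ 'z') then
    if st.1 < 4 then (st.1 + 1, st.2 ++ ['x']) else (st.1, st.2 ++ [c])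
  else (st.1, st.2 ++ [c])

def recomposemaskcode (lst : List String) : List String :=
  lst.foldl (fun out ins =>
    out ++ [String.ofList (ins.toList.foldl pvStepA ((0 : Int), [])).2]) []

-- ===== PORT B =====
-- re.sub(r'[0-9a-z]', 'x', s, count=k): replace the first k matches, copy the rest
def pvSubB : Nat → List Char → List Char
  | _, [] => []
  | 0, cs => cs
  | (k+1), c :: cs =>
    if ('0' ≤ c ∧ c ≤ '9') ∨ ('a' ≤ c ∧ c ≤ 'z') then 'x' :: pvSubB k cs
    else c :: pvSubB (k+1) cs

def recomposemaskcode_alt (lst : List String) : List String :=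
  lst.map (fun s => String.ofList (pvSubB 4 s.toList))

-- ===== PRECONDITION & SPEC =====
def Spec_recomposemaskcode (lst : List String) (out : List String) : Prop := out = recomposemaskcode_alt lst
instance (lst : List String) (out : List String) : Decidable (Spec_recomposemaskcode lst out) := by unfold Spec_recomposemaskcode; infer_instance

-- ===== CLAIM (what is proved, stated in full; the proofs are below) =====
def Claim_equal_recomposemaskcode : Prop := ∀ (lst : List String), Dom_recomposemaskcode lst → Spec_recomposemaskcode lst (recomposemaskcode lst)

-- ===== LEMMAS AND PROOFS =====

theorem pvSubB_zero (cs : List Char) : pvSubB 0 cs = cs := by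
  cases cs <;> simp [pvSubB]

-- A's scan from state (n, acc), 0 ≤ n ≤ 4, equals acc ++ B's substitution with budget 4 - n
theorem pvScan_eq_sub (cs : List Char) :
    ∀ (n : Int) (acc : List Char), 0 ≤ n → n ≤ 4 →
      (cs.foldl pvStepA (n, acc)).2 = acc ++ pvSubB (4 - n).toNat cs := by
  induction cs with
  | nil => intro n acc _ _; simp [pvSubB]
  | cons c cs ih =>
    intro n acc h0 h4
    by_cases hm : ('0' ≤ c ∧ c ≤ '9') ∨ ('a' ≤ c ∧ c ≤ 'z')
    · by_cases hn : n < 4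
      · have hb : (4 - n).toNat = ((4 - (n + 1)).toNat) + 1 := by omega
        simp only [List.foldl_cons, pvStepA, if_pos hm, if_pos hn]
        rw [ih (n + 1) (acc ++ ['x']) (by omega) (by omega), hb]
        simp [pvSubB, if_pos hm]
      · have hn4 : n = 4 := by omega
        have hb : (4 - n).toNat = 0 := by omega
        simp only [List.foldl_cons, pvStepA, if_pos hm, if_neg hn]
        rw [ih n (acc ++ [c]) h0 h4, hb]
        simp [pvSubB_zero]
    · simp only [List.foldl_cons, pvStepA, if_neg hm]
      rw [ih n (acc ++ [c]) h0 h4]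
      rcases hk : (4 - n).toNat with k | k
      · simp [pvSubB_zero]
      · simp [pvSubB, if_neg hm]

theorem pvFoldl_append_map {α β : Type} (g : α → β) (l : List α) :
    ∀ acc : List β, l.foldl (fun out x => out ++ [g x]) acc = acc ++ l.map g := by
  induction l with
  | nil => intro acc; simp
  | cons x l ih => intro acc; simp [ih]

-- ===== VERDICT (by name: the statement is the Claim_ definition above) =====
theorem recomposemaskcode_spec : Claim_equal_recomposemaskcode := by
  intro lst _
  unfold Spec_recomposemaskcode recomposemaskcode recomposemaskcode_alt
  rw [pvFoldl_append_map]
  simp only [List.nil_append]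
  apply List.map_congr_left
  intro s _
  rw [pvScan_eq_sub s.toList 0 [] (by norm_num) (by norm_num)]
  rfl
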